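-- pv_equiv track=rewrite | github.com/t3dy/HPMarginalia | jonson/src/extract/excerpt.py | merge_short_excerpts
-- ===== SOURCE A (Python) =====
-- def merge_short_excerpts(excerpts: list[dict], min_length: int = 50) -> list[dict]:
--     """Merge consecutive excerpts from same source if text is very short."""
--     if not excerpts:
--         return excerpts
--
--     result = []
--     i = 0
--     while i < len(excerpts):
--         current = excerpts[i].copy()
--         # Look ahead and merge short consecutive excerpts from same source
--         while (i + 1 < len(excerpts)
--                and excerpts[i + 1]["source_id"] == current["source_id"]
--                and len(current["text"]) < min_length):
--             next_exc = excerpts[i + 1]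
--             current["text"] += "\n\n" + next_exc["text"]
--             current["page_ref"] += f", {next_exc['page_ref']}"
--             i += 1
--         result.append(current)
--         i += 1
--
--     return result
-- ===== SOURCE B (Python) =====
-- def _merged_len(excerpts, i, j):
--     # length current["text"] would have after merging excerpts[i..j-1] with "\n\n"
--     return len(excerpts[i]["text"]) + sum(
--         2 + len(excerpts[k]["text"]) for k in range(i + 1, j)
--     )
--
--
-- def merge_short_excerpts(excerpts: list[dict], min_length: int = 50) -> list[dict]:
--     """Merge consecutive excerpts from same source if text is very short."""
--     if not excerpts:
--         return excerpts
--
--     # phase 1: split the list into maximal runs of merge-able excerpts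
--     groups = []
--     i, n = 0, len(excerpts)
--     while i < n:
--         j = i + 1
--         while (j < n
--                and excerpts[j]["source_id"] == excerpts[i]["source_id"]
--                and _merged_len(excerpts, i, j) < min_length):
--             j += 1
--         groups.append(excerpts[i:j])
--         i = j
--
--     # phase 2: build one merged dict per run by joining texts / page refs
--     out = []
--     for g in groups:
--         d = g[0].copy()
--         if len(g) > 1:
--             d["text"] = "\n\n".join(x["text"] for x in g)
--             d["page_ref"] = ", ".join(x["page_ref"] for x in g)
--         out.append(d)
--     return out
-- ===== Notes on version B (the rewrite author's own statement) =====
-- stated objective: alternative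
-- what changed: Replaces A's single look-ahead pass that mutates a growing dict with a two-phase algorithm: first compute maximal merge runs using only arithmetic on text lengths, then build each merged excerpt once with str.join.
import Mathlib
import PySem

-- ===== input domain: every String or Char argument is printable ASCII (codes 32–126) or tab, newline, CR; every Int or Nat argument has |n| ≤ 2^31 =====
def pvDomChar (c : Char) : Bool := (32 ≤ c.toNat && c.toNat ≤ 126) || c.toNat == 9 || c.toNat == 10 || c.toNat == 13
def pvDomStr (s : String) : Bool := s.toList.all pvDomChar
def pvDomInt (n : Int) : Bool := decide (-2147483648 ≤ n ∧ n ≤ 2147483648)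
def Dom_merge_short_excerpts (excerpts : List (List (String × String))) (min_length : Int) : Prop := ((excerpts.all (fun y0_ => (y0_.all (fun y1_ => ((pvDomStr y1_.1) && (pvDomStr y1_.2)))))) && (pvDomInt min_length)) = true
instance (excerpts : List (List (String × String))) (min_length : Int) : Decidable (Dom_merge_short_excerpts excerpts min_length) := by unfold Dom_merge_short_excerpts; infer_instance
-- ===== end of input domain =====

-- B replaces A's look-ahead pass that grows one dict by repeated appends with a two-phase
-- algorithm (compute maximal merge runs by length arithmetic, then build each merged dict
-- once with str.join); equal return value on Pre_ (alternative decomposition, not faster).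


-- ===== PORT A =====
-- A's inner while: look ahead and merge short consecutive excerpts from same source,
-- returning the final `current` and the unconsumed tail.  Dict accesses that would raise
-- KeyError in Python are rendered with getD "" (Pre_ keeps the keys present).
def pvA_inner (min_length : Int) (cur : PySem.Dict String String) :
    List (PySem.Dict String String) → PySem.Dict String String × List (PySem.Dict String String)
  | [] => (cur, [])
  | next :: tl =>
    if (next.getD "source_id" "" == cur.getD "source_id" "")
        && decide (PySem.Str.len (cur.getD "text" "") < min_length) then
      pvA_inner min_length
        (PySem.Dict.insert (cur.insert "text" (cur.getD "text" "" ++ "\n\n" ++ next.getD "text" "")) "page_ref" (cur.getD "page_ref" "" ++ ", " ++ next.getD "page_ref" ""))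
        tl
    else (cur, next :: tl)

theorem pvA_inner_len (min_length : Int) :
    ∀ (tl : List (PySem.Dict String String)) (cur : PySem.Dict String String),
      (pvA_inner min_length cur tl).2.length ≤ tl.length := by
  intro tl
  induction tl with
  | nil => intro cur; simp [pvA_inner]
  | cons next tl ih =>
    intro cur
    simp only [pvA_inner]
    split
    · exact Nat.le_trans (ih _) (Nat.le_succ _)
    · simp

-- A's outer while over the remaining excerpts.
def pvA_loop (min_length : Int) : List (PySem.Dict String String) → List (PySem.Dict String String)
  | [] => []
  | e :: tl =>
    let r := pvA_inner min_length e tl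
    r.1 :: pvA_loop min_length r.2
termination_by xs => xs.length
decreasing_by
  exact Nat.lt_succ_of_le (pvA_inner_len min_length tl e)

def merge_short_excerpts (excerpts : List (List (String × String))) (min_length : Int) :
    List (List (String × String)) :=
  if excerpts.isEmpty then excerpts
  else (pvA_loop min_length (excerpts.map PySem.Dict.ofList)).map (·.items)

-- ===== PORT B =====
-- phase-1 helper: the length current["text"] would have after merging start with g.
def pvB_mergedLen (startText : String) (g : List (PySem.Dict String String)) : Int :=
  PySem.Str.len startText + (g.map (fun x => 2 + PySem.Str.len (x.getD "text" ""))).sum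

-- phase 1 inner while: extend the run g while the next excerpt is merge-able.
def pvB_take (min_length : Int) (start : PySem.Dict String String)
    (g : List (PySem.Dict String String)) :
    List (PySem.Dict String String) → List (PySem.Dict String String) × List (PySem.Dict String String)
  | [] => (g, [])
  | next :: tl =>
    if (next.getD "source_id" "" == start.getD "source_id" "")
        && decide (pvB_mergedLen (start.getD "text" "") g < min_length) then
      pvB_take min_length start (g ++ [next]) tl
    else (g, next :: tl)

theorem pvB_take_len (min_length : Int) (start : PySem.Dict String String) :
    ∀ (tl : List (PySem.Dict String String)) (g : List (PySem.Dict String String)),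
      (pvB_take min_length start g tl).2.length ≤ tl.length := by
  intro tl
  induction tl with
  | nil => intro g; simp [pvB_take]
  | cons next tl ih =>
    intro g
    simp only [pvB_take]
    split
    · exact Nat.le_trans (ih _) (Nat.le_succ _)
    · simp

-- phase 1 outer while.
def pvB_groups (min_length : Int) :
    List (PySem.Dict String String) → List (List (PySem.Dict String String))
  | [] => []
  | e :: tl =>
    let r := pvB_take min_length e [] tl
    (e :: r.1) :: pvB_groups min_length r.2
termination_by xs => xs.length
decreasing_by
  exact Nat.lt_succ_of_le (pvB_take_len min_length e tl [])

-- phase 2: build one merged dict per run by joining texts / page refs.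
def pvB_build (g : List (PySem.Dict String String)) : PySem.Dict String String :=
  match g with
  | [] => PySem.Dict.empty
  | d :: rest =>
    if rest.isEmpty then d
    else PySem.Dict.insert (d.insert "text" (PySem.Str.join "\n\n" (g.map (fun x => x.getD "text" "")))) "page_ref" (PySem.Str.join ", " (g.map (fun x => x.getD "page_ref" "")))

def merge_short_excerpts_alt (excerpts : List (List (String × String))) (min_length : Int) :
    List (List (String × String)) :=
  if excerpts.isEmpty then excerpts
  else ((pvB_groups min_length (excerpts.map PySem.Dict.ofList)).map pvB_build).map (·.items)

-- ===== PRECONDITION & SPEC =====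
-- Pre_ excludes multi-element lists in which some excerpt lacks one of the keys
-- "source_id"/"text"/"page_ref" and two adjacent excerpts share a source_id: depending on
-- flow-dependent merge state Python A raises KeyError on most of those (and where it still
-- returns, B returns the same value).
def Pre_merge_short_excerpts (excerpts : List (List (String × String))) (min_length : Int) : Prop :=
  excerpts.length ≤ 1 ∨
    (∀ d ∈ excerpts, "source_id" ∈ d.map Prod.fst ∧ "text" ∈ d.map Prod.fst ∧ "page_ref" ∈ d.map Prod.fst) ∨
    ((∀ d ∈ excerpts, "source_id" ∈ d.map Prod.fst) ∧
      ∀ p ∈ excerpts.zip excerpts.tail,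
        (PySem.Dict.ofList p.1).getD "source_id" "" ≠ (PySem.Dict.ofList p.2).getD "source_id" "")
instance (excerpts : List (List (String × String))) (min_length : Int) : Decidable (Pre_merge_short_excerpts excerpts min_length) := by unfold Pre_merge_short_excerpts; infer_instance

def pvWitness_merge_short_excerpts : (List (List (String × String))) × Int :=
  ([[("source_id", "a"), ("text", "hi"), ("page_ref", "3")],
    [("source_id", "a"), ("text", "there"), ("page_ref", "4")]], 50)

def Spec_merge_short_excerpts (excerpts : List (List (String × String))) (min_length : Int) (out : List (List (String × String))) : Prop := out = merge_short_excerpts_alt excerpts min_length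
instance (excerpts : List (List (String × String))) (min_length : Int) (out : List (List (String × String))) : Decidable (Spec_merge_short_excerpts excerpts min_length out) := by unfold Spec_merge_short_excerpts; infer_instance

-- ===== CLAIM (what is proved, stated in full; the proofs are below) =====
def Claim_equal_merge_short_excerpts : Prop := ∀ (excerpts : List (List (String × String))) (min_length : Int), Dom_merge_short_excerpts excerpts min_length → Pre_merge_short_excerpts excerpts min_length → Spec_merge_short_excerpts excerpts min_length (merge_short_excerpts excerpts min_length)

-- ===== LEMMAS AND PROOFS =====

-- overriding both "text" and "page_ref" again collapses, provided "text" is already a key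
theorem pv_ins_override (d : PySem.Dict String String) {t p : String} (htp : t ≠ p)
    (ht : d.contains t = true) (P T' P' : String) :
    ((d.insert p P).insert t T').insert p P' = (d.insert t T').insert p P' := by
  apply PySem.Dict.ext
  by_cases hp : d.contains p = true
  · have h1 : (d.insert p P).contains t = true := by
      rw [PySem.Dict.contains_insert]; simp [ht]
    have h2 : ((d.insert p P).insert t T').contains p = true := by
      rw [PySem.Dict.contains_insert, PySem.Dict.contains_insert]; simp [hp]
    have h3 : (d.insert t T').contains p = true := by
      rw [PySem.Dict.contains_insert]; simp [hp]
    rw [PySem.Dict.items_insert_of_contains _ _ h2,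
        PySem.Dict.items_insert_of_contains _ _ h1,
        PySem.Dict.items_insert_of_contains _ _ hp,
        PySem.Dict.items_insert_of_contains _ _ h3,
        PySem.Dict.items_insert_of_contains _ _ ht]
    simp only [List.map_map]
    apply List.map_congr_left
    intro q _
    by_cases hq1 : q.1 = p <;> by_cases hq2 : q.1 = t <;>
      simp_all [Function.comp, beq_iff_eq]
  · have hp' : d.contains p = false := by simpa using hp
    have h1 : (d.insert p P).contains t = true := by
      rw [PySem.Dict.contains_insert]; simp [ht]
    have h2 : ((d.insert p P).insert t T').contains p = true := by
      rw [PySem.Dict.contains_insert, PySem.Dict.contains_insert]; simp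
    have h3 : (d.insert t T').contains p = false := by
      rw [PySem.Dict.contains_insert]; simp [hp', Ne.symm htp]
    rw [PySem.Dict.items_insert_of_contains _ _ h2,
        PySem.Dict.items_insert_of_contains _ _ h1,
        PySem.Dict.items_insert_of_not_contains _ _ hp',
        PySem.Dict.items_insert_of_not_contains _ _ h3,
        PySem.Dict.items_insert_of_contains _ _ ht]
    rw [List.map_append, List.map_append, List.map_map]
    congr 1
    · apply List.map_congr_left
      intro q hq
      have hq1 : (q.1 == p) = false := by
        by_contra hc
        have hq1' : (q.1 == p) = true := by revert hc; cases (q.1 == p) <;> simp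
        have hcp : d.contains p = true := by
          unfold PySem.Dict.contains
          exact List.any_eq_true.2 ⟨q, hq, hq1'⟩
        simp [hp'] at hcp
      by_cases hq2 : q.1 = t <;> simp_all [Function.comp, beq_iff_eq]
    · simp [Ne.symm htp, beq_iff_eq]

theorem pv_join_cc (sep x y : String) (tl : List String) :
    PySem.Str.join sep (x :: y :: tl) = x ++ sep ++ PySem.Str.join sep (y :: tl) := by
  apply String.toList_injective
  simp [PySem.Str.join, PySem.Chars.join_cons_cons, String.toList_ofList]

theorem pv_join_singleton (sep x : String) : PySem.Str.join sep [x] = x := by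
  apply String.toList_injective
  simp [PySem.Str.join, PySem.Chars.join_singleton]

theorem pv_join_snoc (sep x : String) : ∀ (l : List String), l ≠ [] →
    PySem.Str.join sep (l ++ [x]) = PySem.Str.join sep l ++ sep ++ x := by
  intro l
  induction l with
  | nil => intro h; exact absurd rfl h
  | cons a l ih =>
    intro _
    cases l with
    | nil => simp [pv_join_cc, pv_join_singleton]
    | cons b l' =>
      rw [show a :: (b :: l') ++ [x] = a :: ((b :: l') ++ [x]) from rfl,
          show (b :: l') ++ [x] = b :: (l' ++ [x]) from rfl, pv_join_cc,
          show b :: (l' ++ [x]) = (b :: l') ++ [x] from rfl, ih (by simp), pv_join_cc]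
      simp [String.append_assoc]

theorem pv_len_join (t0 : String) : ∀ (ts : List String),
    PySem.Str.len (PySem.Str.join "\n\n" (t0 :: ts))
      = PySem.Str.len t0 + (ts.map (fun t => 2 + PySem.Str.len t)).sum := by
  intro ts
  induction ts generalizing t0 with
  | nil => simp [pv_join_singleton]
  | cons b ts ih =>
    rw [pv_join_cc, PySem.Str.len_append, PySem.Str.len_append]
    rw [List.map_cons, List.sum_cons]
    have h2 : PySem.Str.len "\n\n" = 2 := by decide
    rw [h2, ih b]
    ring

theorem pvB_build_single (start : PySem.Dict String String) : pvB_build [start] = start := by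
  simp [pvB_build]

theorem pvB_build_cons (d h : PySem.Dict String String) (g' : List (PySem.Dict String String)) :
    pvB_build (d :: h :: g')
      = PySem.Dict.insert
          (d.insert "text" (PySem.Str.join "\n\n" ((d :: h :: g').map (fun x => x.getD "text" ""))))
          "page_ref" (PySem.Str.join ", " ((d :: h :: g').map (fun x => x.getD "page_ref" ""))) := by
  simp [pvB_build]

theorem pv_build_getD_sid (start : PySem.Dict String String) (g : List (PySem.Dict String String)) :
    (pvB_build (start :: g)).getD "source_id" "" = start.getD "source_id" "" := by
  cases g with
  | nil => simp [pvB_build]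
  | cons h g' =>
    rw [pvB_build_cons,
        PySem.Dict.getD_insert_of_ne _ _ _ (by decide),
        PySem.Dict.getD_insert_of_ne _ _ _ (by decide)]

theorem pv_build_getD_text (start h : PySem.Dict String String) (g' : List (PySem.Dict String String)) :
    (pvB_build (start :: h :: g')).getD "text" ""
      = PySem.Str.join "\n\n" ((start :: h :: g').map (fun x => x.getD "text" "")) := by
  rw [pvB_build_cons, PySem.Dict.getD_insert_of_ne _ _ _ (by decide), PySem.Dict.getD_insert_self]

theorem pv_build_getD_page (start h : PySem.Dict String String) (g' : List (PySem.Dict String String)) :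
    (pvB_build (start :: h :: g')).getD "page_ref" ""
      = PySem.Str.join ", " ((start :: h :: g').map (fun x => x.getD "page_ref" "")) := by
  rw [pvB_build_cons, PySem.Dict.getD_insert_self]

theorem pv_build_len (start : PySem.Dict String String) (g : List (PySem.Dict String String)) :
    PySem.Str.len ((pvB_build (start :: g)).getD "text" "")
      = pvB_mergedLen (start.getD "text" "") g := by
  cases g with
  | nil => simp [pvB_build, pvB_mergedLen]
  | cons h g' =>
    rw [pv_build_getD_text, List.map_cons, pv_len_join]
    simp only [pvB_mergedLen, List.map_map]
    rfl

-- the inserted dict of one A-merge step equals B's build of the extended run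
theorem pv_step_eq (start next : PySem.Dict String String) (g : List (PySem.Dict String String)) :
    PySem.Dict.insert
        ((pvB_build (start :: g)).insert "text"
          ((pvB_build (start :: g)).getD "text" "" ++ "\n\n" ++ next.getD "text" ""))
        "page_ref"
        ((pvB_build (start :: g)).getD "page_ref" "" ++ ", " ++ next.getD "page_ref" "")
      = pvB_build (start :: (g ++ [next])) := by
  cases g with
  | nil =>
    rw [show (start :: ([] : List (PySem.Dict String String))) = [start] from rfl,
        pvB_build_single, List.nil_append, pvB_build_cons]
    simp only [List.map_cons, List.map_nil]
    rw [pv_join_cc, pv_join_singleton, pv_join_cc, pv_join_singleton]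
  | cons h g' =>
    rw [pv_build_getD_text, pv_build_getD_page, pvB_build_cons,
        pv_ins_override (start.insert "text" _) (by decide)
          (PySem.Dict.contains_insert_self start "text" _),
        PySem.Dict.insert_insert_self,
        ← pv_join_snoc _ _ _ (by simp : ((start :: h :: g').map (fun x => x.getD "text" "")) ≠ []),
        ← pv_join_snoc _ _ _ (by simp : ((start :: h :: g').map (fun x => x.getD "page_ref" "")) ≠ [])]
    have hmap : ∀ (f : PySem.Dict String String → String),
        (start :: h :: g').map f ++ [f next] = (start :: ((h :: g') ++ [next])).map f := by
      intro f; simp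
    rw [hmap, hmap, show start :: ((h :: g') ++ [next]) = start :: h :: (g' ++ [next]) from rfl,
        pvB_build_cons]

theorem pv_inner_eq (min_length : Int) (start : PySem.Dict String String) :
    ∀ (rest g : List (PySem.Dict String String)),
      pvA_inner min_length (pvB_build (start :: g)) rest
        = (pvB_build (start :: (pvB_take min_length start g rest).1),
           (pvB_take min_length start g rest).2) := by
  intro rest
  induction rest with
  | nil => intro g; simp [pvA_inner, pvB_take]
  | cons next tl ih =>
    intro g
    simp only [pvA_inner, pvB_take, pv_build_getD_sid, pv_build_len]
    by_cases hc : ((next.getD "source_id" "" == start.getD "source_id" "")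
        && decide (pvB_mergedLen (start.getD "text" "") g < min_length)) = true
    · rw [if_pos hc, if_pos hc, pv_step_eq, ih (g ++ [next])]
    · rw [if_neg hc, if_neg hc]

theorem pv_loop_eq (min_length : Int) :
    ∀ xs, pvA_loop min_length xs = (pvB_groups min_length xs).map pvB_build := by
  suffices h : ∀ (n : Nat) (xs : List (PySem.Dict String String)), xs.length ≤ n →
      pvA_loop min_length xs = (pvB_groups min_length xs).map pvB_build by
    exact fun xs => h xs.length xs le_rfl
  intro n
  induction n with
  | zero =>
    intro xs h
    have hx : xs = [] := List.eq_nil_of_length_eq_zero (Nat.le_zero.mp h)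
    subst hx
    simp [pvA_loop, pvB_groups]
  | succ n ih =>
    intro xs h
    cases xs with
    | nil => simp [pvA_loop, pvB_groups]
    | cons e tl =>
      rw [pvA_loop, pvB_groups]
      have he : pvA_inner min_length e tl
          = (pvB_build (e :: (pvB_take min_length e [] tl).1),
             (pvB_take min_length e [] tl).2) := by
        conv_lhs => rw [show e = pvB_build (e :: []) from (pvB_build_single e).symm]
        exact pv_inner_eq min_length e tl []
      simp only [he, List.map_cons]
      congr 1
      exact ih _ (Nat.le_trans (pvB_take_len min_length e tl []) (Nat.le_of_succ_le_succ h))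

-- ===== VERDICT (by name: the statement is the Claim_ definition above) =====
theorem merge_short_excerpts_spec : Claim_equal_merge_short_excerpts := by
  intro excerpts min_length _ _
  unfold Spec_merge_short_excerpts merge_short_excerpts merge_short_excerpts_alt
  rw [pv_loop_eq]
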